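-- pv_equiv track=rewrite | github.com/larissalages/sequence_classification | all_feature_generation.py | stringToWords
-- ===== SOURCE A (Python) =====
-- def stringToWords(s,acceptableWords,wordLength):
-- 	counts={}
-- 	for i in range(len(s)-wordLength+1):
-- 		k=s[i:i+wordLength]
-- 		if k in acceptableWords:
-- 			if k not in counts:
-- 				counts[k] = 1
-- 			else:
-- 				counts[k]= counts[k] +1
-- 	return counts
-- ===== SOURCE B (Python) =====
-- def stringToWords(s, acceptableWords, wordLength):
--     windows = [s[i:i + wordLength] for i in range(len(s) - wordLength + 1)]
--     acceptable = set(acceptableWords)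
--     return {w: windows.count(w) for w in dict.fromkeys(windows) if w in acceptable}
-- ===== Notes on version B (the rewrite author's own statement) =====
-- stated objective: alternative
-- what changed: A makes one left-to-right window pass maintaining an incrementally updated counter dict with a two-branch conditional update; B instead materialises the list of windows, dedups it (dict.fromkeys) to get the distinct windows in first-occurrence order, and for each distinct acceptable window computes its full count with one windows.count scan — staged passes with per-word counting instead of a single incremental pass.
import Mathlib
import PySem

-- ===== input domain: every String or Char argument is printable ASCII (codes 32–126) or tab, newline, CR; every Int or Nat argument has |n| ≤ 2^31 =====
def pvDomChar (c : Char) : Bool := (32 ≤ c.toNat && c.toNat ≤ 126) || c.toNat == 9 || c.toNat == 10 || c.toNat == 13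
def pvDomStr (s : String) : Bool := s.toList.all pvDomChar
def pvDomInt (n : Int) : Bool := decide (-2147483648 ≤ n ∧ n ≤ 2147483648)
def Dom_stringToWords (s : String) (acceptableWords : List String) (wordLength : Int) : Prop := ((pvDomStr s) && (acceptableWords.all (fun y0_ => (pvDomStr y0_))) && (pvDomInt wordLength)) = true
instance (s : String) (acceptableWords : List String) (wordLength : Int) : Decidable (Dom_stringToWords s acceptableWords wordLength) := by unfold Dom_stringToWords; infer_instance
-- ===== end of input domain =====

-- B replaces A's single incremental counting pass by staged passes: materialise the
-- window list, dedup it, and count each distinct acceptable window with a full scan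
-- (objective: alternative decomposition, not faster).

-- ===== PORT A =====
-- literal port of A: one pass over window start positions; if the window is in the
-- acceptableWords list, initialise or bump its dict entry (counts[k] is getD 0 under contains)
def stringToWords (s : String) (acceptableWords : List String) (wordLength : Int) : List (String × Int) :=
  ((PySem.List.pyRange 0 (PySem.Str.len s - wordLength + 1) 1).foldl
    (fun counts i =>
      let k := PySem.Str.slice s (some i) (some (i + wordLength))
      if acceptableWords.contains k then
        if counts.contains k = false then counts.insert k 1
        else counts.insert k (counts.getD k 0 + 1)
      else counts)
    PySem.Dict.empty).items

-- ===== PORT B =====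
-- literal port of B: windows = the list comprehension of slices; acceptable = set(acceptableWords);
-- then the dict comprehension over dict.fromkeys(windows) (= PySem.List.dedup) inserting
-- windows.count(w) for each acceptable distinct window w
def stringToWords_alt (s : String) (acceptableWords : List String) (wordLength : Int) : List (String × Int) :=
  let windows := (PySem.List.pyRange 0 (PySem.Str.len s - wordLength + 1) 1).map
      (fun i => PySem.Str.slice s (some i) (some (i + wordLength)))
  let acceptable := PySem.Set.ofList acceptableWords
  ((PySem.List.dedup windows).foldl
      (fun d w =>
        if PySem.Set.contains acceptable w then d.insert w (PySem.List.count windows w)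
        else d)
      PySem.Dict.empty).items

-- ===== PRECONDITION & SPEC =====
def Spec_stringToWords (s : String) (acceptableWords : List String) (wordLength : Int) (out : List (String × Int)) : Prop := out = stringToWords_alt s acceptableWords wordLength
instance (s : String) (acceptableWords : List String) (wordLength : Int) (out : List (String × Int)) : Decidable (Spec_stringToWords s acceptableWords wordLength out) := by unfold Spec_stringToWords; infer_instance

-- ===== CLAIM (what is proved, stated in full; the proofs are below) =====
def Claim_equal_stringToWords : Prop := ∀ (s : String) (acceptableWords : List String) (wordLength : Int), Dom_stringToWords s acceptableWords wordLength → Spec_stringToWords s acceptableWords wordLength (stringToWords s acceptableWords wordLength)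

-- ===== LEMMAS AND PROOFS =====

-- A's two-branch update is exactly the counting insert (getD of an absent key is 0)
theorem pv_branch_eq (c : PySem.Dict String Int) (k : String) :
    (if c.contains k = false then c.insert k 1 else c.insert k (c.getD k 0 + 1))
      = c.insert k (c.getD k 0 + 1) := by
  by_cases h : c.contains k = false
  · simp [h, PySem.Dict.getD_of_not_contains c 0 h]
  · simp [h]

-- Python dedup (Set.ofList) commutes with filtering
theorem pv_foldl_add_filter (p : String → Bool) (xs acc : List String) :
    ((xs.foldl PySem.Set.add acc).filter p) = (xs.filter p).foldl PySem.Set.add (acc.filter p) := by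
  induction xs generalizing acc with
  | nil => simp
  | cons x t ih =>
    by_cases hp : p x <;> by_cases h : x ∈ acc <;>
      simp [PySem.Set.add, PySem.Set.contains, List.filter_append,
        List.mem_filter, hp, h, ih]

theorem pv_ofList_filter (p : String → Bool) (xs : List String) :
    PySem.Set.ofList (xs.filter p) = (PySem.Set.ofList xs).filter p := by
  have := pv_foldl_add_filter p xs []
  simpa [PySem.Set.ofList, PySem.Set.empty] using this.symm

-- the core equality, for an arbitrary window function and list of start positions
theorem pv_core (win : Int → String) (rng : List Int) (acc : List String) :
    (rng.foldl
      (fun counts i =>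
        if acc.contains (win i) then
          if counts.contains (win i) = false then counts.insert (win i) 1
          else counts.insert (win i) (counts.getD (win i) 0 + 1)
        else counts)
      (PySem.Dict.empty : PySem.Dict String Int)).items
    = ((PySem.List.dedup (rng.map win)).foldl
        (fun d w =>
          if PySem.Set.contains (PySem.Set.ofList acc) w then
            d.insert w (PySem.List.count (rng.map win) w)
          else d)
        (PySem.Dict.empty : PySem.Dict String Int)).items := by
  have eA : rng.foldl
      (fun counts i =>
        if acc.contains (win i) then
          if counts.contains (win i) = false then counts.insert (win i) 1
          else counts.insert (win i) (counts.getD (win i) 0 + 1)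
        else counts)
      (PySem.Dict.empty : PySem.Dict String Int)
      = (rng.map win).foldl
          (fun counts k =>
            if acc.contains k then
              if counts.contains k = false then counts.insert k 1
              else counts.insert k (counts.getD k 0 + 1)
            else counts)
          PySem.Dict.empty :=
    (List.foldl_map (f := win)
      (g := fun (counts : PySem.Dict String Int) k =>
        if acc.contains k then
          if counts.contains k = false then counts.insert k 1
          else counts.insert k (counts.getD k 0 + 1)
        else counts)
      (l := rng) (init := PySem.Dict.empty)).symm
  rw [eA]
  generalize rng.map win = windows
  have hfun : (fun (counts : PySem.Dict String Int) k =>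
      if acc.contains k then
        if counts.contains k = false then counts.insert k 1
        else counts.insert k (counts.getD k 0 + 1)
      else counts)
      = (fun (counts : PySem.Dict String Int) k =>
          if acc.contains k then counts.insert k (counts.getD k 0 + 1) else counts) := by
    funext c k
    by_cases h : k ∈ acc
    · simp [h, pv_branch_eq c k]
    · simp [h]
  -- A side: filtered counter
  rw [hfun, ← List.foldl_filter, PySem.Dict.foldl_insert_getD_add_one_eq_counter,
    PySem.Dict.items_counter]
  -- B side: the condition Set.contains (ofList acc) w is acc.contains w
  have hcond : (fun (d : PySem.Dict String Int) w =>
      if PySem.Set.contains (PySem.Set.ofList acc) w then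
        d.insert w (PySem.List.count windows w)
      else d)
      = (fun (d : PySem.Dict String Int) w =>
          if acc.contains w then d.insert w (PySem.List.count windows w) else d) := by
    funext d w
    by_cases h : w ∈ acc <;>
      simp [PySem.Set.contains, PySem.Set.mem_ofList, h]
  rw [hcond, ← List.foldl_filter]
  -- B's fold inserts fresh distinct keys, so its items are the mapped list
  have hnd : ((PySem.List.dedup windows).filter acc.contains).Nodup :=
    (PySem.List.nodup_dedup windows).filter _
  have hfresh := PySem.Dict.items_foldl_insert_fresh
    (l := (PySem.List.dedup windows).filter acc.contains)
    (k := fun w => w) (v := fun w => (↑(PySem.List.count windows w) : Int))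
    (d := PySem.Dict.empty)
    (fun a _ => PySem.Dict.contains_empty a) (by simpa using hnd)
  beta_reduce at hfresh
  rw [hfresh]
  simp only [PySem.Dict.empty, List.nil_append, PySem.List.dedup_eq_ofList,
    ← pv_ofList_filter]
  refine List.map_congr_left (fun k hk => ?_)
  have hpk : acc.contains k = true := by
    have := (PySem.Set.mem_ofList (windows.filter (fun w => acc.contains w)) k).mp hk
    exact (List.mem_filter.mp this).2
  have hc : (windows.filter (fun w => acc.contains w)).count k = windows.count k :=
    List.count_filter hpk
  simp [PySem.List.count_eq, hc]

-- ===== VERDICT (by name: the statement is the Claim_ definition above) =====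
theorem stringToWords_spec : Claim_equal_stringToWords := by
  intro s acc wL _
  unfold Spec_stringToWords stringToWords stringToWords_alt
  exact pv_core (fun i => PySem.Str.slice s (some i) (some (i + wL)))
    (PySem.List.pyRange 0 (PySem.Str.len s - wL + 1) 1) acc
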